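-- pv_equiv track=rewrite | github.com/alexandraback/datacollection | solutions_5690574640250880_0/Python/linzhou/minesweeper.py | arrangeempty
-- ===== SOURCE A (Python) =====
-- def arrangeempty(R,C,tr,N):
-- 	tmparr = []
-- 	for x in range(0,R):
-- 		tmparr.append([])
-- 		for y in range(0,C):
-- 			tmparr[x].append(-1)
--
-- 	for y in range(0,C):
-- 		for x in range(0,tr):
-- 			if (N > 0):
-- 				N -= 1
-- 				tmparr[R-1-x][C-1-y]=0
-- 	if N > 0:
-- 		for y in range(0,N):
-- 			tmparr[R-1-tr][C-1-y] = 0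
-- 	return tmparr
-- ===== SOURCE B (Python) =====
-- def arrangeempty(R, C, tr, N):
--     # build the R x C grid of -1 in one comprehension
--     grid = [[-1] * C for _ in range(R)]
--     cap = max(0, C) * max(0, tr)          # cells available in the bottom tr rows
--     filled = min(max(0, N), cap)          # zeros placed inside that rectangle
--     for i in range(filled):
--         grid[R - 1 - i % tr][C - 1 - i // tr] = 0
--     for y in range(max(0, N) - cap):      # overflow row (empty range when N <= cap)
--         grid[R - 1 - tr][C - 1 - y] = 0
--     return grid
-- ===== Notes on version B (the rewrite author's own statement) =====
-- stated objective: simpler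
-- what changed: A's guarded nested loop with a mutable countdown counter is replaced by a closed-form count (filled = min(max(0,N), cap)) driven through one flat index loop i -> (i%tr, i//tr), plus an arithmetically-bounded overflow loop; the grid is built by a comprehension with list repetition instead of nested appends.
import Mathlib
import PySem

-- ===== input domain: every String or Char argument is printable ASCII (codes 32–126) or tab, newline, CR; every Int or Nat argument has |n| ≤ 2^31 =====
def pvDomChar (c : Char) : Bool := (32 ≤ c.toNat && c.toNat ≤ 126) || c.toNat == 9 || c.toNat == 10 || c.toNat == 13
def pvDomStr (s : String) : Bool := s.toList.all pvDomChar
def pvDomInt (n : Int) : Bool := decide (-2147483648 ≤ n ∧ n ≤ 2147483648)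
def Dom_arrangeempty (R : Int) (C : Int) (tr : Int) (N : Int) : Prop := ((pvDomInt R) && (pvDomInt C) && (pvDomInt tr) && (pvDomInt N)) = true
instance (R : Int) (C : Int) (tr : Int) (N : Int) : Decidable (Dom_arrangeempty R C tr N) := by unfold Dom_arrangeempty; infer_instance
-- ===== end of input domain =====

-- B replaces A's guarded nested loop with a closed-form count and one flat index loop (simpler decomposition; equivalence is about the return value only).

-- ===== PORT A =====
def arrangeempty (R : Int) (C : Int) (tr : Int) (N : Int) : List (List Int) :=
  let tmparr : List (List Int) :=
    (PySem.List.pyRange 0 R 1).foldl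
      (fun acc x =>
        let acc2 := acc ++ [([] : List Int)]
        (PySem.List.pyRange 0 C 1).foldl
          (fun a _y => PySem.List.pySetD a x (PySem.List.pyGetD a x [] ++ [(-1 : Int)])) acc2)
      []
  let st : List (List Int) × Int :=
    (PySem.List.pyRange 0 C 1).foldl
      (fun st y =>
        (PySem.List.pyRange 0 tr 1).foldl
          (fun st x =>
            if st.2 > 0 then
              (PySem.List.pySetD st.1 (R - 1 - x)
                 (PySem.List.pySetD (PySem.List.pyGetD st.1 (R - 1 - x) []) (C - 1 - y) 0),
               st.2 - 1)
            else st)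
          st)
      (tmparr, N)
  if st.2 > 0 then
    (PySem.List.pyRange 0 st.2 1).foldl
      (fun g y => PySem.List.pySetD g (R - 1 - tr)
          (PySem.List.pySetD (PySem.List.pyGetD g (R - 1 - tr) []) (C - 1 - y) 0)) st.1
  else st.1

-- ===== PORT B =====
def arrangeempty_alt (R : Int) (C : Int) (tr : Int) (N : Int) : List (List Int) :=
  let grid0 : List (List Int) :=
    (PySem.List.pyRange 0 R 1).map (fun _ => PySem.List.pyRepeat [(-1 : Int)] C)
  let cap := max 0 C * max 0 tr
  let filled := min (max 0 N) cap
  let grid1 :=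
    (PySem.List.pyRange 0 filled 1).foldl
      (fun g i => PySem.List.pySetD g (R - 1 - PySem.Int.mod i tr)
          (PySem.List.pySetD (PySem.List.pyGetD g (R - 1 - PySem.Int.mod i tr) [])
            (C - 1 - PySem.Int.floordiv i tr) 0)) grid0
  (PySem.List.pyRange 0 (max 0 N - cap) 1).foldl
    (fun g y => PySem.List.pySetD g (R - 1 - tr)
        (PySem.List.pySetD (PySem.List.pyGetD g (R - 1 - tr) []) (C - 1 - y) 0)) grid1

-- ===== PRECONDITION & SPEC =====
-- Pre_ holds exactly where Python A returns normally (i.e. it excludes exactly the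
-- inputs on which A raises IndexError while assigning outside the grid).
def Pre_arrangeempty (R : Int) (C : Int) (tr : Int) (N : Int) : Prop :=
  ¬ (1 ≤ C ∧ 2 * max R 0 + 1 ≤ tr ∧ 2 * max R 0 + 1 ≤ N) ∧
  ¬ (max C 0 * max tr 0 < N ∧
      (tr < 0 ∨ 2 * max R 0 ≤ tr ∨ 2 * max C 0 + 1 ≤ N - max C 0 * max tr 0))
instance (R : Int) (C : Int) (tr : Int) (N : Int) : Decidable (Pre_arrangeempty R C tr N) := by
  unfold Pre_arrangeempty; infer_instance
def pvWitness_arrangeempty : Int × Int × Int × Int := (3, 3, 1, 4)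
def Spec_arrangeempty (R : Int) (C : Int) (tr : Int) (N : Int) (out : List (List Int)) : Prop :=
  out = arrangeempty_alt R C tr N
instance (R : Int) (C : Int) (tr : Int) (N : Int) (out : List (List Int)) :
    Decidable (Spec_arrangeempty R C tr N out) := by unfold Spec_arrangeempty; infer_instance

-- ===== CLAIM (what is proved, stated in full; the proofs are below) =====
def Claim_equal_arrangeempty : Prop := ∀ (R : Int) (C : Int) (tr : Int) (N : Int),
  Dom_arrangeempty R C tr N → Pre_arrangeempty R C tr N →
  Spec_arrangeempty R C tr N (arrangeempty R C tr N)

-- ===== LEMMAS AND PROOFS =====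

-- a single zero-write at (row, col), Python index semantics
def wrCell (g : List (List Int)) (p : Int × Int) : List (List Int) :=
  PySem.List.pySetD g p.1 (PySem.List.pySetD (PySem.List.pyGetD g p.1 []) p.2 0)

-- A's guarded step on a pair, with the countdown counter
def gstep (st : List (List Int) × Int) (p : Int × Int) : List (List Int) × Int :=
  if st.2 > 0 then (wrCell st.1 p, st.2 - 1) else st

lemma set_concat {α : Type} (pre : List α) (a b : α) :
    (pre ++ [a]).set pre.length b = pre ++ [b] := by
  induction pre with
  | nil => rfl
  | cons x xs ih => simp [ih]

lemma getD_concat {α : Type} (pre : List α) (a d : α) :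
    (pre ++ [a]).getD pre.length d = a := by
  simp [List.getD]

-- appending m copies of -1 to the last row, addressed by its index
lemma append_loop {β : Type} (l : List β) : ∀ (pre : List (List Int)) (cur : List Int),
    l.foldl (fun a _ => PySem.List.pySetD a (pre.length : Int)
        (PySem.List.pyGetD a (pre.length : Int) [] ++ [(-1 : Int)])) (pre ++ [cur])
      = pre ++ [cur ++ List.replicate l.length (-1)] := by
  induction l with
  | nil => intro pre cur; simp
  | cons b bs ih =>
    intro pre cur
    have hstep : PySem.List.pySetD (pre ++ [cur]) (pre.length : Int)
        (PySem.List.pyGetD (pre ++ [cur]) (pre.length : Int) [] ++ [(-1 : Int)])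
        = pre ++ [cur ++ [-1]] := by
      rw [PySem.List.pySetD_natCast, PySem.List.pyGetD_natCast, getD_concat, set_concat]
    rw [List.foldl_cons, hstep, ih pre (cur ++ [-1])]
    simp [List.replicate_succ]

-- the initial grid both programs build
lemma build_eq (C : Int) : ∀ n : Nat,
    (PySem.List.pyRange 0 (n : Int) 1).foldl
      (fun acc x =>
        let acc2 := acc ++ [([] : List Int)]
        (PySem.List.pyRange 0 C 1).foldl
          (fun a _y => PySem.List.pySetD a x (PySem.List.pyGetD a x [] ++ [(-1 : Int)])) acc2)
      []
    = List.replicate n (List.replicate C.toNat (-1)) := by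
  intro n
  induction n with
  | zero => simp [PySem.List.pyRange_one_eq_nil]
  | succ m ih =>
    have hcast : ((m + 1 : Nat) : Int) = (m : Int) + 1 := by push_cast; ring
    rw [hcast, PySem.List.pyRange_one_succ_right (by positivity), List.foldl_append, ih]
    have hm : ((m : Int)) = ((List.replicate m (List.replicate C.toNat (-1 : Int))).length : Int) := by
      simp
    simp only [List.foldl_cons, List.foldl_nil]
    have happ := append_loop (PySem.List.pyRange 0 C 1)
      (List.replicate m (List.replicate C.toNat (-1 : Int))) []
    have hlen : (List.replicate m (List.replicate C.toNat (-1 : Int))).length = m := by simp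
    rw [hlen] at happ
    simp only [List.nil_append] at happ
    rw [happ]
    simp only [PySem.List.length_pyRange_one, List.replicate_succ']
    simp

-- the counted loop writes the first n cells and decrements accordingly
lemma counter_foldl (l : List (Int × Int)) : ∀ (g : List (List Int)) (n : Int),
    l.foldl gstep (g, n)
      = ((l.take n.toNat).foldl wrCell g, n - (min n.toNat l.length : Nat)) := by
  induction l with
  | nil => intro g n; simp
  | cons p ps ih =>
    intro g n
    by_cases hn : n > 0
    · have h1 : gstep (g, n) p = (wrCell g p, n - 1) := by simp [gstep, hn]
      simp only [List.foldl_cons, h1, ih]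
      have ht : n.toNat = (n - 1).toNat + 1 := by omega
      rw [ht]
      simp only [List.take_succ_cons, List.foldl_cons, List.length_cons, Prod.mk.injEq]
      exact ⟨by trivial, by omega⟩
    · have h1 : gstep (g, n) p = (g, n) := by simp [gstep, hn]
      simp only [List.foldl_cons, h1, ih]
      have : n.toNat = 0 := by omega
      simp [this]

-- the y-major pair list is the flat-index pair list (positive tr)
lemma flat_eq (R C tr : Int) (htr : 0 < tr) : ∀ m : Nat,
    (PySem.List.pyRange 0 (m : Int) 1).flatMap
      (fun y => (PySem.List.pyRange 0 tr 1).map (fun x => ((R - 1 - x, C - 1 - y) : Int × Int)))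
    = (PySem.List.pyRange 0 ((m : Int) * tr) 1).map
        (fun i => (R - 1 - PySem.Int.mod i tr, C - 1 - PySem.Int.floordiv i tr)) := by
  intro m
  induction m with
  | zero => simp [PySem.List.pyRange_one_eq_nil]
  | succ m ih =>
    have hcast : ((m + 1 : Nat) : Int) = (m : Int) + 1 := by push_cast; ring
    rw [hcast, PySem.List.pyRange_one_succ_right (by positivity), List.flatMap_append, ih]
    have hsplit : PySem.List.pyRange 0 (((m : Int) + 1) * tr) 1
        = PySem.List.pyRange 0 ((m : Int) * tr) 1
          ++ PySem.List.pyRange ((m : Int) * tr) (((m : Int) + 1) * tr) 1 := by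
      rw [← PySem.List.pyRange_one_append 0 ((m : Int) * tr) (((m : Int) + 1) * tr)
        (by positivity) (by nlinarith)]
    rw [hsplit, List.map_append]
    congr 1
    -- one block: range(m*tr, (m+1)*tr) under the flat map = row m
    rw [PySem.List.pyRange_one 0 tr, PySem.List.pyRange_one ((m : Int) * tr)]
    simp only [List.flatMap_cons, List.flatMap_nil, List.append_nil, List.map_map]
    have hlen : (((m : Int) + 1) * tr - (m : Int) * tr).toNat = (tr - 0).toNat := by
      congr 1; ring_nf
    rw [hlen]
    apply List.map_congr_left
    intro k hk
    have hklt : (k : Int) < tr := by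
      have := List.mem_range.mp hk
      omega
    have hk0 : (0 : Int) ≤ (k : Int) := by positivity
    have hmod : PySem.Int.mod ((m : Int) * tr + (k : Int)) tr = (k : Int) := by
      rw [PySem.Int.mod_eq_emod_of_pos htr]
      rw [add_comm, Int.add_mul_emod_self_right]
      exact Int.emod_eq_of_lt hk0 hklt
    have hdiv : PySem.Int.floordiv ((m : Int) * tr + (k : Int)) tr = (m : Int) := by
      rw [PySem.Int.floordiv_eq_ediv_of_pos htr]
      rw [add_comm, Int.add_mul_ediv_right _ _ (by omega)]
      rw [Int.ediv_eq_zero_of_lt hk0 hklt]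
      ring
    simp only [Function.comp, zero_add, hmod, hdiv]

-- prefixes of the flat pair list
lemma take_map_pyRange {α : Type} (f : Int → α) (M : Int) (k : Nat) :
    ((PySem.List.pyRange 0 M 1).map f).take k
      = (PySem.List.pyRange 0 ((min k M.toNat : Nat) : Int) 1).map f := by
  rw [PySem.List.pyRange_one 0 M, PySem.List.pyRange_one 0 ((min k M.toNat : Nat) : Int)]
  simp only [List.map_map, ← List.map_take, List.take_range]
  congr 2
  omega

theorem arrangeempty_equal (R C tr N : Int) : arrangeempty R C tr N = arrangeempty_alt R C tr N := by
  unfold arrangeempty arrangeempty_alt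
  -- initial grids
  have hgrid0 : (PySem.List.pyRange 0 R 1).foldl
      (fun acc x =>
        let acc2 := acc ++ [([] : List Int)]
        (PySem.List.pyRange 0 C 1).foldl
          (fun a _y => PySem.List.pySetD a x (PySem.List.pyGetD a x [] ++ [(-1 : Int)])) acc2)
      []
      = (PySem.List.pyRange 0 R 1).map (fun _ => PySem.List.pyRepeat [(-1 : Int)] C) := by
    have hmapconst : (PySem.List.pyRange 0 R 1).map (fun _ => PySem.List.pyRepeat [(-1 : Int)] C)
        = List.replicate R.toNat (List.replicate C.toNat (-1)) := by
      rw [List.map_const']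
      simp [PySem.List.length_pyRange_one, PySem.List.pyRepeat_singleton]
    rw [hmapconst]
    by_cases hR : 0 ≤ R
    · have : R = ((R.toNat : Nat) : Int) := by omega
      rw [this, build_eq]
      simp
      omega
    · rw [show PySem.List.pyRange 0 R 1 = [] from PySem.List.pyRange_one_eq_nil (by omega)]
      have : R.toNat = 0 := by omega
      simp [this]
  rw [hgrid0]
  set g0 := (PySem.List.pyRange 0 R 1).map (fun _ => PySem.List.pyRepeat [(-1 : Int)] C) with hg0
  -- loop 1 as a fold of gstep over the y-major pair list
  have hinner : ∀ (st : List (List Int) × Int) (y : Int),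
      (PySem.List.pyRange 0 tr 1).foldl
        (fun st x =>
          if st.2 > 0 then
            (PySem.List.pySetD st.1 (R - 1 - x)
               (PySem.List.pySetD (PySem.List.pyGetD st.1 (R - 1 - x) []) (C - 1 - y) 0),
             st.2 - 1)
          else st) st
      = ((PySem.List.pyRange 0 tr 1).map (fun x => ((R - 1 - x, C - 1 - y) : Int × Int))).foldl
          gstep st := by
    intro st y
    rw [List.foldl_map]
    rfl
  simp only [hinner]
  rw [← List.foldl_flatMap]
  set L := (PySem.List.pyRange 0 C 1).flatMap
    (fun y => (PySem.List.pyRange 0 tr 1).map (fun x => ((R - 1 - x, C - 1 - y) : Int × Int)))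
    with hL
  rw [counter_foldl]
  -- the pair list and its length, by cases on tr, C
  have hLdata : L.take N.toNat
        = (PySem.List.pyRange 0 (min (max 0 N) (max 0 C * max 0 tr)) 1).map
            (fun i => (R - 1 - PySem.Int.mod i tr, C - 1 - PySem.Int.floordiv i tr))
      ∧ (L.length : Int) = max 0 C * max 0 tr := by
    by_cases htr : 0 < tr
    · by_cases hC : 0 < C
      · have hCm : C = ((C.toNat : Nat) : Int) := by omega
        have hLeq : L = (PySem.List.pyRange 0 ((C.toNat : Int) * tr) 1).map
            (fun i => (R - 1 - PySem.Int.mod i tr, C - 1 - PySem.Int.floordiv i tr)) := by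
          rw [hL, show PySem.List.pyRange 0 C 1 = PySem.List.pyRange 0 ((C.toNat : Nat) : Int) 1
            from by rw [← hCm]]
          exact flat_eq R C tr htr C.toNat
        have hcap : max 0 C * max 0 tr = (C.toNat : Int) * tr := by
          rw [max_eq_right hC.le, max_eq_right htr.le, ← hCm]
        have hX : (0 : Int) ≤ (C.toNat : Int) * tr := by positivity
        constructor
        · rw [hLeq, take_map_pyRange, hcap]
          congr 2
          omega
        · rw [hLeq, hcap]
          simp only [List.length_map, PySem.List.length_pyRange_one]
          omega
      · have hLnil : L = [] := by
          rw [hL, PySem.List.pyRange_one_eq_nil (show C ≤ 0 by omega)]; rfl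
        have hcap : max 0 C * max 0 tr = 0 := by
          rw [max_eq_left (by omega)]; ring
        constructor
        · rw [hLnil, hcap]
          have : min (max 0 N) 0 = 0 := by omega
          rw [this, PySem.List.pyRange_one_eq_nil (le_refl 0)]
          simp
        · rw [hLnil, hcap]; simp
    · have hLnil : L = [] := by
        rw [hL, PySem.List.pyRange_one_eq_nil (show tr ≤ 0 by omega)]
        · simp
      have hcap : max 0 C * max 0 tr = 0 := by
        rw [max_eq_left (show tr ≤ 0 by omega)]; ring
      constructor
      · rw [hLnil, hcap]
        have : min (max 0 N) 0 = 0 := by omega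
        rw [this, PySem.List.pyRange_one_eq_nil (le_refl 0)]
        simp
      · rw [hLnil, hcap]; simp
  obtain ⟨hTake, hLen⟩ := hLdata
  -- loop 1 grids agree
  have hfold1 : (L.take N.toNat).foldl wrCell g0
      = (PySem.List.pyRange 0 (min (max 0 N) (max 0 C * max 0 tr)) 1).foldl
          (fun g i => PySem.List.pySetD g (R - 1 - PySem.Int.mod i tr)
            (PySem.List.pySetD (PySem.List.pyGetD g (R - 1 - PySem.Int.mod i tr) [])
              (C - 1 - PySem.Int.floordiv i tr) 0)) g0 := by
    rw [hTake, List.foldl_map]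
    rfl
  rw [hfold1]
  set g1 := (PySem.List.pyRange 0 (min (max 0 N) (max 0 C * max 0 tr)) 1).foldl
    (fun g i => PySem.List.pySetD g (R - 1 - PySem.Int.mod i tr)
      (PySem.List.pySetD (PySem.List.pyGetD g (R - 1 - PySem.Int.mod i tr) [])
        (C - 1 - PySem.Int.floordiv i tr) 0)) g0
  -- overflow loop bounds agree
  have hNn : (min N.toNat L.length : Nat) = min (max 0 N) (max 0 C * max 0 tr) := by
    have hcap0 : (0:Int) ≤ max 0 C * max 0 tr := by positivity
    omega
  rw [hNn]
  by_cases hrem : N - min (max 0 N) (max 0 C * max 0 tr) > 0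
  · rw [if_pos hrem]
    have hcap0 : (0:Int) ≤ max 0 C * max 0 tr := by positivity
    have : N - min (max 0 N) (max 0 C * max 0 tr) = max 0 N - max 0 C * max 0 tr := by omega
    rw [this]
  · rw [if_neg hrem]
    have hcap0 : (0:Int) ≤ max 0 C * max 0 tr := by positivity
    have : max 0 N - max 0 C * max 0 tr ≤ 0 := by omega
    rw [PySem.List.pyRange_one_eq_nil this, List.foldl_nil]

-- ===== VERDICT (by name: the statement is the Claim_ definition above) =====
theorem arrangeempty_spec : Claim_equal_arrangeempty := by
  intro R C tr N _ _
  unfold Spec_arrangeempty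
  exact arrangeempty_equal R C tr N
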